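-- pv_equiv track=rewrite | github.com/CharleyZhao123/sweat_and_harvest | py/base_1_base_sort.py | insertSortShell
-- ===== SOURCE A (Python) =====
-- from typing import List
--
-- def insertSortShell(arr: List[int], gap: int) -> List[int]:
--     arr_len = len(arr)
--     i = 0
--     while i < gap:
--         j = i + gap
--         while j < arr_len:
--             j_now = arr[j]
--             k = j
--             while j_now < arr[k - gap] and k >= i + gap:
--                 arr[k] = arr[k-gap]
--                 k -= gap
--             arr[k] = j_now
--
--             j += gap
--         i += 1
--
--     return arr
-- ===== SOURCE B (Python) =====
-- def insertSortShell(arr, gap):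
--     # Selection sort on each gap-strided subsequence (in place, like A; returns arr).
--     n = len(arr)
--     for start in range(gap):
--         for i in range(start, n, gap):
--             m = i
--             for k in range(i + gap, n, gap):
--                 if arr[k] < arr[m]:
--                     m = k
--             arr[i], arr[m] = arr[m], arr[i]
--     return arr
-- ===== Notes on version B (the rewrite author's own statement) =====
-- stated objective: alternative
-- what changed: A runs a shifting insertion sort along each gap-strided subsequence with three nested while loops; B instead selection-sorts each strided subsequence (scan the remaining strided positions for the minimum, then swap), using for-range loops, so no elements are shifted.
import Mathlib
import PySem

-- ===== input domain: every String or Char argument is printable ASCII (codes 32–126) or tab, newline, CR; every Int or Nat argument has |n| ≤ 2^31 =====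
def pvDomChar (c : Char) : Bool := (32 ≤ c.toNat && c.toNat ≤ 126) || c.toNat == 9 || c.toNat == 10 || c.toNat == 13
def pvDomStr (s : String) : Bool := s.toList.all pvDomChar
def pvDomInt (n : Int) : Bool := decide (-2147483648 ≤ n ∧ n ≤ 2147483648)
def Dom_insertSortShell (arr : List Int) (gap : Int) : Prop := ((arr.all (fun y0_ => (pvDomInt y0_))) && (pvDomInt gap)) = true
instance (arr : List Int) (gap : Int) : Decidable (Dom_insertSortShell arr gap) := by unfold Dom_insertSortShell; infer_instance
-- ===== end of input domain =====

-- B replaces the per-stride shifting insertion sort of A by a per-stride selection sort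
-- (scan for the minimum, swap), same cost class; both Pythons sort arr in place and
-- return it (identical side effect), the equivalence proved here is about the return value.

-- ===== PORT A =====
def aShift (arr : List Int) (i gap jnow k : Int) : List Int × Int :=
  if h : 0 < gap ∧ jnow < PySem.List.pyGetD arr (k - gap) 0 ∧ i + gap ≤ k then
    aShift (PySem.List.pySetD arr k (PySem.List.pyGetD arr (k - gap) 0)) i gap jnow (k - gap)
  else (arr, k)
termination_by (k - i).toNat
decreasing_by omega

def aJ (arr : List Int) (i gap j n : Int) : List Int :=
  if h : 0 < gap ∧ j < n then
    let jnow := PySem.List.pyGetD arr j 0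
    let p := aShift arr i gap jnow j
    aJ (PySem.List.pySetD p.1 p.2 jnow) i gap (j + gap) n
  else arr
termination_by (n - j).toNat
decreasing_by omega

-- strided subsequence l[p], l[p+g], ...

def aI (arr : List Int) (i gap n : Int) : List Int :=
  if _h : i < gap then aI (aJ arr i gap (i + gap) n) (i + 1) gap n else arr
termination_by (gap - i).toNat
decreasing_by omega

def insertSortShell (arr : List Int) (gap : Int) : List Int :=
  aI arr 0 gap (arr.length : Int)

-- ===== PORT B =====
def insertSortShell_alt (arr : List Int) (gap : Int) : List Int :=
  let n : Int := (arr.length : Int)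
  (PySem.List.pyRange 0 gap 1).foldl (fun a start =>
    (PySem.List.pyRange start n gap).foldl (fun a i =>
      let m := (PySem.List.pyRange (i + gap) n gap).foldl
        (fun m k => if PySem.List.pyGetD a k 0 < PySem.List.pyGetD a m 0 then k else m) i
      PySem.List.pySetD (PySem.List.pySetD a i (PySem.List.pyGetD a m 0)) m
        (PySem.List.pyGetD a i 0)) a) arr

-- ===== PRECONDITION & SPEC =====
def Spec_insertSortShell (arr : List Int) (gap : Int) (out : List Int) : Prop := out = insertSortShell_alt arr gap
instance (arr : List Int) (gap : Int) (out : List Int) : Decidable (Spec_insertSortShell arr gap out) := by unfold Spec_insertSortShell; infer_instance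

-- ===== CLAIM (what is proved, stated in full; the proofs are below) =====
def Claim_equal_insertSortShell : Prop := ∀ (arr : List Int) (gap : Int), Dom_insertSortShell arr gap → Spec_insertSortShell arr gap (insertSortShell arr gap)

-- ===== LEMMAS AND PROOFS =====
def strideN (l : List Int) (p g : Nat) : List Int :=
  if h : p < l.length ∧ 0 < g then l[p]'h.1 :: strideN l (p + g) g else []
termination_by l.length - p
decreasing_by omega

lemma strideN_nil (l : List Int) (p g : Nat) (h : l.length ≤ p) : strideN l p g = [] := by
  rw [strideN]; rw [dif_neg]; omega

lemma strideN_cons (l : List Int) (p g : Nat) (hg : 0 < g) (h : p < l.length) :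
    strideN l p g = l[p] :: strideN l (p + g) g := by
  rw [strideN]; rw [dif_pos ⟨h, hg⟩]

lemma lt_length_strideN_iff (l : List Int) (g : Nat) (hg : 0 < g) :
    ∀ (t p : Nat), t < (strideN l p g).length ↔ p + t * g < l.length := by
  intro t
  induction t with
  | zero =>
    intro p
    by_cases h : p < l.length
    · rw [strideN_cons l p g hg h]; simpa using h
    · rw [strideN_nil l p g (by omega)]; simp; omega
  | succ t ih =>
    intro p
    by_cases h : p < l.length
    · rw [strideN_cons l p g hg h]
      simp only [List.length_cons, Nat.add_lt_add_iff_right, ih (p + g)]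
      have : (t + 1) * g = t * g + g := by ring
      constructor <;> intro <;> omega
    · rw [strideN_nil l p g (by omega)]; simp; omega

lemma strideN_getElem? (l : List Int) (g : Nat) (hg : 0 < g) :
    ∀ (t p : Nat) (h : p + t * g < l.length), (strideN l p g)[t]? = some (l[p + t * g]'h) := by
  intro t
  induction t with
  | zero => intro p h; rw [strideN_cons l p g hg (by omega)]; simp
  | succ t ih =>
    intro p h
    have he : (t + 1) * g = t * g + g := by ring
    rw [strideN_cons l p g hg (by omega)]
    have h' : (p + g) + t * g < l.length := by omega
    simp only [List.getElem?_cons_succ, show p + (t + 1) * g = p + g + t * g from by ring]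
    exact ih (p + g) h'

lemma strideN_getElem (l : List Int) (g : Nat) (hg : 0 < g) (t p : Nat)
    (h : p + t * g < l.length) (ht : t < (strideN l p g).length) :
    (strideN l p g)[t] = l[p + t * g]'h := by
  have := strideN_getElem? l g hg t p h
  rw [List.getElem?_eq_getElem ht] at this
  exact Option.some_injective _ this

lemma strideN_set_off (l : List Int) (g q : Nat) (v : Int) (hg : 0 < g) :
    ∀ (d p : Nat), l.length ≤ p + d → (∀ t, q ≠ p + t * g) →
      strideN (l.set q v) p g = strideN l p g := by
  intro d
  induction d with
  | zero =>
    intro p hd _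
    rw [strideN_nil _ _ _ (by simp; omega), strideN_nil _ _ _ (by omega)]
  | succ d ih =>
    intro p hd hq
    by_cases h : p < l.length
    · rw [strideN_cons _ _ _ hg (by simpa using h), strideN_cons _ _ _ hg h]
      have hqp : q ≠ p := by simpa using hq 0
      rw [List.getElem_set]
      simp only [if_neg hqp]
      rw [ih (p + g) (by omega)
        (by intro t hc; have he : (t + 1) * g = t * g + g := Nat.succ_mul t g; have h2 := hq (t + 1); omega)]
    · rw [strideN_nil _ _ _ (by simp; omega), strideN_nil _ _ _ (by omega)]

lemma strideN_set_on (l : List Int) (g : Nat) (v : Int) (hg : 0 < g) :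
    ∀ (d p t : Nat), l.length ≤ p + d → (h : p + t * g < l.length) →
      strideN (l.set (p + t * g) v) p g = (strideN l p g).set t v := by
  intro d
  induction d with
  | zero => intro p t hd h; omega
  | succ d ih =>
    intro p t hd h
    have hp : p < l.length := by omega
    rw [strideN_cons _ _ _ hg (by simpa using hp), strideN_cons _ _ _ hg hp]
    cases t with
    | zero =>
      simp only [Nat.zero_mul, Nat.add_zero] at h ⊢
      rw [List.getElem_set]
      simp only [List.set_cons_zero]
      congr 1
      exact strideN_set_off l g p v hg (d + 1) (p + g) (by omega)
        (by intro t; omega)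
    | succ t =>
      rw [List.getElem_set]
      rw [if_neg (by have he : (t + 1) * g = t * g + g := Nat.succ_mul t g; omega)]
      simp only [List.set_cons_succ]
      congr 1
      have : p + (t + 1) * g = (p + g) + t * g := by ring
      rw [this]
      exact ih (p + g) t (by omega) (by omega)

lemma pyGetD_nat (l : List Int) (n : Nat) (h : n < l.length) :
    PySem.List.pyGetD l (↑n) 0 = l[n] := by
  rw [PySem.List.pyGetD_natCast]
  exact List.getD_eq_getElem l 0 h

lemma sortedAppendOne (w : List Int) (x : Int) (hw : w.Pairwise (· ≤ ·))
    (hx : ∀ a ∈ w, a ≤ x) : (w ++ [x]).Pairwise (· ≤ ·) :=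
  List.pairwise_append.mpr ⟨hw, List.pairwise_singleton _ _, by simpa⟩

lemma take_succ_getElem (s : List Int) (t : Nat) (h : t < s.length) :
    s.take (t + 1) = s.take t ++ [s[t]] := by
  rw [List.take_succ]; simp [List.getElem?_eq_getElem h]

lemma mem_take_le (s : List Int) (t : Nat) (hs : (s.take (t + 1)).Pairwise (· ≤ ·))
    (ht : t < s.length) (a : Int) (ha : a ∈ s.take t) : a ≤ s[t] := by
  obtain ⟨e, he, rfl⟩ := List.getElem_of_mem ha
  have he' : e < t := by simp at he; omega
  have h1 : (s.take t)[e] = s[e]'(by simp at he; omega) := List.getElem_take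
  have h2 := (List.pairwise_iff_getElem.mp hs) e t
    (by simp; omega) (by simp; omega) he'
  simp only [List.getElem_take] at h2 ⊢
  exact h2

lemma insStepA (i g : Nat) (hg : 0 < g) :
    ∀ (t : Nat) (l : List Int) (x : Int), i + t * g < l.length →
      ((strideN l i g).take t).Pairwise (· ≤ ·) →
      ∃ (t' : Nat) (r : List Int) (u : List Int),
        aShift l (↑i) (↑g) x (↑(i + t * g)) = (r, (↑(i + t' * g) : Int)) ∧
        i + t' * g < l.length ∧
        (r.set (i + t' * g) x).length = l.length ∧
        (∀ q, (∀ w, q ≠ i + w * g) → (r.set (i + t' * g) x)[q]? = l[q]?) ∧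
        strideN (r.set (i + t' * g) x) i g = u ++ (strideN l i g).drop (t + 1) ∧
        u.Perm ((strideN l i g).take t ++ [x]) ∧
        u.Pairwise (· ≤ ·) := by
  intro t
  induction t with
  | zero =>
    intro l x ht _
    refine ⟨0, l, [x], ?_, ht, by simp, ?_, ?_, by simp, List.pairwise_singleton _ _⟩
    · rw [aShift, dif_neg (by rintro ⟨-, -, hc⟩; push_cast at hc; omega)]
    · intro q hq
      rw [List.getElem?_set, if_neg (hq 0).symm]
    · have h0 : 0 < (strideN l i g).length := by
        rw [lt_length_strideN_iff l g hg]; simpa using ht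
      rw [strideN_set_on l g x hg l.length i 0 (by omega) ht,
        List.set_eq_take_cons_drop x h0]
      simp
  | succ t ih =>
    intro l x ht hsort
    have hmul : (t + 1) * g = t * g + g := Nat.succ_mul t g
    have hPt : i + t * g < l.length := by omega
    have hts : t + 1 < (strideN l i g).length := by
      rw [lt_length_strideN_iff l g hg]; exact ht
    have hidx : ((↑(i + (t + 1) * g) : Int)) - ↑g = ↑(i + t * g) := by push_cast; ring
    have htt : t < (strideN l i g).length := by omega
    have hst : (strideN l i g)[t]'htt = l[i + t * g]'hPt :=
      strideN_getElem l g hg t i hPt htt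
    by_cases hx : x < l[i + t * g]
    · -- shift and recurse
      rw [aShift, dif_pos ⟨by exact_mod_cast hg,
          by rw [hidx, pyGetD_nat l _ hPt]; exact hx,
          by exact_mod_cast (by omega : i + g ≤ i + (t + 1) * g)⟩]
      rw [hidx, pyGetD_nat l _ hPt, PySem.List.pySetD_natCast]
      set st := l[i + t * g]'hPt with hstdef
      set l2 := l.set (i + (t + 1) * g) st with hl2
      have hlen2 : l2.length = l.length := by simp [hl2]
      have hstr2 : strideN l2 i g = (strideN l i g).set (t + 1) st :=
        strideN_set_on l g st hg l.length i (t + 1) (by omega) ht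
      have hsort2 : ((strideN l2 i g).take t).Pairwise (· ≤ ·) := by
        rw [hstr2, List.take_set_of_le (by omega)]
        have : (strideN l i g).take t = ((strideN l i g).take (t + 1)).take t := by
          rw [List.take_take]; simp
        rw [this]
        exact List.Pairwise.sublist (List.take_sublist _ _) hsort
      obtain ⟨t', r, u', heq, hlt', hlen, hoff, hstr, hperm, hpw⟩ :=
        ih l2 x (by omega) hsort2
      have hdrop : (strideN l2 i g).drop (t + 1) =
          st :: (strideN l i g).drop (t + 2) := by
        rw [hstr2, List.set_eq_take_cons_drop st hts,
          List.drop_left' (List.length_take_of_le (by omega)),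
          show t + 1 + 1 = t + 2 from rfl]
      refine ⟨t', r, u' ++ [st], heq, by omega, by omega, ?_, ?_, ?_, ?_⟩
      · intro q hq
        rw [hoff q hq, hl2, List.getElem?_set, if_neg (hq (t + 1)).symm]
      · rw [hstr, hdrop]; simp
      · -- perm
        have h1 : (u' ++ [st]).Perm (((strideN l2 i g).take t ++ [x]) ++ [st]) :=
          hperm.append_right [st]
        have h2 : (strideN l2 i g).take t = (strideN l i g).take t := by
          rw [hstr2, List.take_set_of_le (by omega)]
        rw [h2] at h1
        refine h1.trans ?_
        rw [take_succ_getElem _ t htt, hst]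
        have h3 := List.Perm.append_left ((strideN l i g).take t) (List.Perm.swap st x [])
        simpa [List.append_assoc] using h3
      · -- pairwise
        refine sortedAppendOne u' st hpw ?_
        intro a ha
        have := hperm.mem_iff.mp ha
        rw [hstr2, List.take_set_of_le (by omega)] at this
        rcases List.mem_append.mp this with h | h
        · exact (mem_take_le (strideN l i g) t hsort htt a h).trans (le_of_eq hst)
        · simp at h; subst h; exact le_of_lt hx
    · -- stop here
      rw [aShift, dif_neg (by
        rintro ⟨-, hc, -⟩
        rw [hidx, pyGetD_nat l _ hPt] at hc
        exact hx hc)]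
      refine ⟨t + 1, l, (strideN l i g).take (t + 1) ++ [x], rfl, ht, by simp, ?_, ?_,
        List.Perm.refl _, ?_⟩
      · intro q hq
        rw [List.getElem?_set, if_neg (hq (t + 1)).symm]
      · rw [strideN_set_on l g x hg l.length i (t + 1) (by omega) ht,
          List.set_eq_take_cons_drop x hts]
        simp
      · refine sortedAppendOne _ x hsort ?_
        intro a ha
        rw [take_succ_getElem _ t (by omega)] at ha
        rcases List.mem_append.mp ha with h | h
        · have h2 : (strideN l i g)[t]'htt ≤ x := by rw [hst]; omega
          exact (mem_take_le (strideN l i g) t hsort htt a h).trans h2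
        · simp only [List.mem_singleton] at h; subst h; rw [hst]; omega

lemma passA_stop (i g : Nat) (hg : 0 < g) (l : List Int) (t : Nat)
    (hd : l.length ≤ i + t * g)
    (hsort : ((strideN l i g).take t).Pairwise (· ≤ ·)) :
    aJ l (↑i) (↑g) (↑(i + t * g)) (↑l.length) = l ∧
    (strideN l i g).Pairwise (· ≤ ·) := by
  constructor
  · rw [aJ, dif_neg]
    rintro ⟨-, hlt⟩
    have : i + t * g < l.length := by exact_mod_cast hlt
    omega
  · have hle : (strideN l i g).length ≤ t := by
      have := lt_length_strideN_iff l g hg t i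
      omega
    rw [← List.take_of_length_le hle]
    exact hsort

lemma passA_aux (i g : Nat) (hg : 0 < g) :
    ∀ (d : Nat) (l : List Int) (t : Nat), l.length ≤ i + t * g + d →
      ((strideN l i g).take t).Pairwise (· ≤ ·) →
      (aJ l (↑i) (↑g) (↑(i + t * g)) (↑l.length)).length = l.length ∧
      (∀ q, (∀ w, q ≠ i + w * g) → (aJ l (↑i) (↑g) (↑(i + t * g)) (↑l.length))[q]? = l[q]?) ∧
      (strideN (aJ l (↑i) (↑g) (↑(i + t * g)) (↑l.length)) i g).Perm (strideN l i g) ∧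
      (strideN (aJ l (↑i) (↑g) (↑(i + t * g)) (↑l.length)) i g).Pairwise (· ≤ ·) := by
  intro d
  induction d with
  | zero =>
    intro l t hd hsort
    obtain ⟨h1, h2⟩ := passA_stop i g hg l t (by omega) hsort
    rw [h1]
    exact ⟨rfl, fun q _ => rfl, List.Perm.refl _, h2⟩
  | succ d ih =>
    intro l t hd hsort
    by_cases hc : i + t * g < l.length
    · have hmul : (t + 1) * g = t * g + g := Nat.succ_mul t g
      have hts : t < (strideN l i g).length := (lt_length_strideN_iff l g hg t i).mpr hc
      obtain ⟨t', r, u, heq, hlt', hlen, hoff, hstr, hperm, hpw⟩ :=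
        insStepA i g hg t l (l[i + t * g]'hc) hc hsort
      have hst : (strideN l i g)[t]'hts = l[i + t * g]'hc :=
        strideN_getElem l g hg t i hc hts
      set r' := r.set (i + t' * g) (l[i + t * g]'hc) with hr'
      have hlenr' : r'.length = l.length := hlen
      have hstep : aJ l (↑i) (↑g) (↑(i + t * g)) (↑l.length) =
          aJ r' (↑i) (↑g) (↑(i + (t + 1) * g)) (↑r'.length) := by
        conv_lhs => rw [aJ]
        rw [dif_pos ⟨by exact_mod_cast hg, by exact_mod_cast hc⟩]
        simp only [pyGetD_nat l _ hc, heq, PySem.List.pySetD_natCast]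
        rw [← hr'.symm, ← hlenr',
          show ((↑(i + t * g) : Int)) + ↑g = ↑(i + (t + 1) * g) from by push_cast; ring]
      have hu_len : u.length = t + 1 := by
        have hl := hperm.length_eq
        simp [List.length_take_of_le (le_of_lt hts)] at hl
        omega
      have htake : (strideN r' i g).take (t + 1) = u := by
        rw [hstr, ← hu_len, List.take_left]
      have hsort' : ((strideN r' i g).take (t + 1)).Pairwise (· ≤ ·) := by
        rw [htake]; exact hpw
      have hpr : (strideN r' i g).Perm (strideN l i g) := by
        rw [hstr]
        refine (hperm.append_right _).trans ?_
        rw [← hst, ← take_succ_getElem _ t hts]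
        exact List.Perm.of_eq (List.take_append_drop _ _)
      obtain ⟨ih1, ih2, ih3, ih4⟩ := ih r' (t + 1) (by omega) hsort'
      rw [hstep]
      refine ⟨by rw [ih1, hlenr'], ?_, ih3.trans hpr, ih4⟩
      intro q hq
      rw [ih2 q hq]
      exact hoff q hq
    · obtain ⟨h1, h2⟩ := passA_stop i g hg l t (by omega) hsort
      rw [h1]
      exact ⟨rfl, fun q _ => rfl, List.Perm.refl _, h2⟩

lemma pyRange_pos_nil (a b s : Int) (hs : 0 < s) (h : b ≤ a) :
    PySem.List.pyRange a b s = [] := by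
  rw [PySem.List.pyRange_of_pos _ _ hs]
  simp [not_lt.mpr h]

lemma pyRange_pos_cons (a b s : Int) (hs : 0 < s) (h : a < b) :
    PySem.List.pyRange a b s = a :: PySem.List.pyRange (a + s) b s := by
  rw [PySem.List.pyRange_of_pos _ _ hs, PySem.List.pyRange_of_pos _ _ hs]
  rw [if_pos h]
  by_cases h2 : a + s < b
  · rw [if_pos h2]
    have hc : b - a + s - 1 = (b - (a + s) + s - 1) + 1 * s := by ring
    rw [hc, Int.add_mul_ediv_right _ _ (by omega)]
    have hge : 0 ≤ (b - (a + s) + s - 1) / s := by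
      apply Int.ediv_nonneg _ (by omega); omega
    rw [Int.toNat_add hge (by omega), show Int.toNat 1 = 1 from rfl]
    rw [List.range_succ_eq_map]
    simp only [List.map_cons, List.map_map]
    congr 1
    · simp
    · apply List.map_congr_left
      intro k _
      simp [Function.comp, Nat.succ_eq_add_one]
      push_cast
      ring
  · rw [if_neg h2]
    have hc : (b - a + s - 1) / s = 1 := by
      have h3 : b - a + s - 1 = (b - a - 1) + 1 * s := by ring
      rw [h3, Int.add_mul_ediv_right _ _ (by omega)]
      rw [Int.ediv_eq_zero_of_lt (by omega) (by omega)]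
      ring
    rw [hc]
    simp

lemma getD_set_ite (l : List Int) (q n : Nat) (v : Int) (hq : q < l.length) :
    (l.set q v).getD n 0 = if q = n then v else l.getD n 0 := by
  rw [List.getD_eq_getElem?_getD, List.getD_eq_getElem?_getD, List.getElem?_set]
  by_cases h : q = n
  · subst h; simp [hq]
  · simp [h]

lemma stride_idx_inj (i g e f : Nat) (hg : 0 < g) (h : i + e * g = i + f * g) : e = f := by
  have : e * g = f * g := by omega
  exact Nat.eq_of_mul_eq_mul_right hg this

lemma selMinAux (i g : Nat) (hg : 0 < g) (l : List Int) (nn : Int) (hn : nn = ↑l.length) :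
    ∀ (d c a : Nat), l.length ≤ i + c * g + d → i + a * g < l.length →
      ∃ m : Nat,
        (PySem.List.pyRange (↑(i + c * g)) nn (↑g)).foldl
          (fun m k => if PySem.List.pyGetD l k 0 < PySem.List.pyGetD l m 0 then k else m)
          (↑(i + a * g)) = ↑(i + m * g) ∧
        i + m * g < l.length ∧ (m = a ∨ c ≤ m) ∧
        l.getD (i + m * g) 0 ≤ l.getD (i + a * g) 0 ∧
        (∀ e, c ≤ e → i + e * g < l.length →
          l.getD (i + m * g) 0 ≤ l.getD (i + e * g) 0) := by
  intro d
  induction d with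
  | zero =>
    intro c a hd ha
    refine ⟨a, ?_, ha, Or.inl rfl, le_rfl, ?_⟩
    · rw [pyRange_pos_nil _ _ _ (by exact_mod_cast hg)
        (by rw [hn]; exact_mod_cast (by omega : l.length ≤ i + c * g))]
      rfl
    · intro e hce hee
      have := Nat.mul_le_mul_right g hce
      omega
  | succ d ih =>
    intro c a hd ha
    by_cases hcl : i + c * g < l.length
    · rw [pyRange_pos_cons _ _ _ (by exact_mod_cast hg) (by rw [hn]; exact_mod_cast hcl)]
      simp only [List.foldl_cons]
      rw [show ((↑(i + c * g) : Int)) + ↑g = ↑(i + (c + 1) * g) from by push_cast; ring]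
      simp only [PySem.List.pyGetD_natCast]
      have hmul : (c + 1) * g = c * g + g := Nat.succ_mul c g
      by_cases hlt : l.getD (i + c * g) 0 < l.getD (i + a * g) 0
      · rw [if_pos hlt]
        obtain ⟨m, hm1, hm2, hm3, hm4, hm5⟩ := ih (c + 1) c (by omega) hcl
        refine ⟨m, hm1, hm2, Or.inr (by omega), hm4.trans (le_of_lt hlt), ?_⟩
        intro e hce hee
        rcases Nat.eq_or_lt_of_le hce with rfl | hlt2
        · exact hm4
        · exact hm5 e (by omega) hee
      · rw [if_neg hlt]
        obtain ⟨m, hm1, hm2, hm3, hm4, hm5⟩ := ih (c + 1) a (by omega) ha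
        refine ⟨m, hm1, hm2, by omega, hm4, ?_⟩
        intro e hce hee
        rcases Nat.eq_or_lt_of_le hce with rfl | hlt2
        · exact hm4.trans (not_lt.mp hlt)
        · exact hm5 e (by omega) hee
    · refine ⟨a, ?_, ha, Or.inl rfl, le_rfl, ?_⟩
      · rw [pyRange_pos_nil _ _ _ (by exact_mod_cast hg)
          (by rw [hn]; exact_mod_cast (by omega : l.length ≤ i + c * g))]
        rfl
      · intro e hce hee
        have := Nat.mul_le_mul_right g hce
        omega

lemma passB_stop (i g : Nat) (hg : 0 < g) (l : List Int) (t : Nat)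
    (hd : l.length ≤ i + t * g)
    (hinv : ∀ a b : Nat, a < t → a ≤ b → i + b * g < l.length →
      l.getD (i + a * g) 0 ≤ l.getD (i + b * g) 0) :
    (strideN l i g).Pairwise (· ≤ ·) := by
  rw [List.pairwise_iff_getElem]
  intro a b ha hb hab
  have hbl : i + b * g < l.length := by
    have := lt_length_strideN_iff l g hg b i; omega
  have hal : i + a * g < l.length := by
    have h1 := Nat.mul_le_mul_right g (le_of_lt hab); omega
  have hst : (strideN l i g).length ≤ t := by
    rcases Nat.le_total (strideN l i g).length t with h | h
    · exact h
    · rcases Nat.eq_or_lt_of_le h with h2 | h2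
      · omega
      · have := (lt_length_strideN_iff l g hg t i).mp h2
        omega
  rw [strideN_getElem l g hg a i hal ha, strideN_getElem l g hg b i hbl hb]
  have := hinv a b (by omega) (by omega) hbl
  rwa [List.getD_eq_getElem l 0 hal, List.getD_eq_getElem l 0 hbl] at this

lemma passB_aux (i g : Nat) (hg : 0 < g) (nn : Int) :
    ∀ (d : Nat) (l : List Int) (t : Nat), nn = ↑l.length → l.length ≤ i + t * g + d →
      (∀ a b : Nat, a < t → a ≤ b → i + b * g < l.length →
        l.getD (i + a * g) 0 ≤ l.getD (i + b * g) 0) →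
      ((PySem.List.pyRange (↑(i + t * g)) nn (↑g)).foldl
          (fun a j =>
            let m := (PySem.List.pyRange (j + ↑g) nn (↑g)).foldl
              (fun m k => if PySem.List.pyGetD a k 0 < PySem.List.pyGetD a m 0 then k else m) j
            PySem.List.pySetD (PySem.List.pySetD a j (PySem.List.pyGetD a m 0)) m
              (PySem.List.pyGetD a j 0)) l).length = l.length ∧
      (∀ q, (∀ w, q ≠ i + w * g) →
        ((PySem.List.pyRange (↑(i + t * g)) nn (↑g)).foldl
          (fun a j =>
            let m := (PySem.List.pyRange (j + ↑g) nn (↑g)).foldl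
              (fun m k => if PySem.List.pyGetD a k 0 < PySem.List.pyGetD a m 0 then k else m) j
            PySem.List.pySetD (PySem.List.pySetD a j (PySem.List.pyGetD a m 0)) m
              (PySem.List.pyGetD a j 0)) l)[q]? = l[q]?) ∧
      (strideN ((PySem.List.pyRange (↑(i + t * g)) nn (↑g)).foldl
          (fun a j =>
            let m := (PySem.List.pyRange (j + ↑g) nn (↑g)).foldl
              (fun m k => if PySem.List.pyGetD a k 0 < PySem.List.pyGetD a m 0 then k else m) j
            PySem.List.pySetD (PySem.List.pySetD a j (PySem.List.pyGetD a m 0)) m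
              (PySem.List.pyGetD a j 0)) l) i g).Perm (strideN l i g) ∧
      (strideN ((PySem.List.pyRange (↑(i + t * g)) nn (↑g)).foldl
          (fun a j =>
            let m := (PySem.List.pyRange (j + ↑g) nn (↑g)).foldl
              (fun m k => if PySem.List.pyGetD a k 0 < PySem.List.pyGetD a m 0 then k else m) j
            PySem.List.pySetD (PySem.List.pySetD a j (PySem.List.pyGetD a m 0)) m
              (PySem.List.pyGetD a j 0)) l) i g).Pairwise (· ≤ ·) := by
  intro d
  induction d with
  | zero =>
    intro l t hn hd hinv
    rw [pyRange_pos_nil _ _ _ (by exact_mod_cast hg)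
      (by rw [hn]; exact_mod_cast (by omega : l.length ≤ i + t * g))]
    exact ⟨rfl, fun q _ => rfl, List.Perm.refl _,
      passB_stop i g hg l t (by omega) hinv⟩
  | succ d ih =>
    intro l t hn hd hinv
    by_cases hc : i + t * g < l.length
    · have hmul : (t + 1) * g = t * g + g := Nat.succ_mul t g
      rw [pyRange_pos_cons _ _ _ (by exact_mod_cast hg) (by rw [hn]; exact_mod_cast hc)]
      simp only [List.foldl_cons]
      rw [show ((↑(i + t * g) : Int)) + ↑g = ↑(i + (t + 1) * g) from by push_cast; ring]
      obtain ⟨m, hm1, hm2, hm3, hm4, hm5⟩ :=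
        selMinAux i g hg l nn hn (l.length) (t + 1) t (by omega) hc
      rw [hm1]
      simp only [PySem.List.pyGetD_natCast, PySem.List.pySetD_natCast]
      set vm := l.getD (i + m * g) 0 with hvm
      set vt := l.getD (i + t * g) 0 with hvt
      set l2 := (l.set (i + t * g) vm).set (i + m * g) vt with hl2
      have htm : t ≤ m := by omega
      have hlen2 : l2.length = l.length := by simp [hl2]
      have hval : ∀ e : Nat, l2.getD (i + e * g) 0 =
          if e = m then vt else if e = t then vm else l.getD (i + e * g) 0 := by
        intro e
        rw [hl2, getD_set_ite _ _ _ _ (by simp; exact hm2),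
          getD_set_ite _ _ _ _ hc]
        by_cases h1 : e = m
        · subst h1; rw [if_pos rfl, if_pos rfl]
        · rw [if_neg (fun hh => h1 (stride_idx_inj i g m e hg hh).symm), if_neg h1]
          by_cases h2 : e = t
          · subst h2; rw [if_pos rfl, if_pos rfl]
          · rw [if_neg (fun hh => h2 (stride_idx_inj i g t e hg hh).symm), if_neg h2]
      have hm5' : ∀ e, t ≤ e → i + e * g < l.length → vm ≤ l.getD (i + e * g) 0 := by
        intro e he hb
        rcases Nat.eq_or_lt_of_le he with rfl | hlt2
        · exact hm4
        · exact hm5 e (by omega) hb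
      have hinv2 : ∀ a b : Nat, a < t + 1 → a ≤ b → i + b * g < l2.length →
          l2.getD (i + a * g) 0 ≤ l2.getD (i + b * g) 0 := by
        intro a b hat hab hbb
        rw [hlen2] at hbb
        rw [hval a, hval b]
        by_cases hat' : a < t
        · rw [if_neg (by omega), if_neg (by omega)]
          by_cases hbm : b = m
          · rw [if_pos hbm]
            exact hinv a t hat' (by omega) hc
          · rw [if_neg hbm]
            by_cases hbt : b = t
            · rw [if_pos hbt]
              exact hinv a m hat' (by omega) hm2
            · rw [if_neg hbt]
              exact hinv a b hat' hab hbb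
        · have hat'' : a = t := by omega
          have hLHS : (if a = m then vt else if a = t then vm else l.getD (i + a * g) 0) = vm := by
            by_cases h1 : a = m
            · rw [if_pos h1, hvt, hvm, ← h1, ← hat'']
            · rw [if_neg h1, if_pos hat'']
          rw [hLHS]
          by_cases hbm : b = m
          · rw [if_pos hbm]; exact hm4
          · rw [if_neg hbm]
            by_cases hbt : b = t
            · rw [if_pos hbt]
            · rw [if_neg hbt]
              exact hm5' b (by omega) hbb
      have hts : t < (strideN l i g).length := (lt_length_strideN_iff l g hg t i).mpr hc
      have hms : m < (strideN l i g).length := (lt_length_strideN_iff l g hg m i).mpr hm2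
      have hstr2 : strideN l2 i g =
          ((strideN l i g).set t ((strideN l i g)[m]'hms)).set m ((strideN l i g)[t]'hts) := by
        rw [hl2]
        have e1 : strideN (l.set (i + t * g) vm) i g = (strideN l i g).set t vm :=
          strideN_set_on l g vm hg l.length i t (by omega) hc
        have e2 : strideN ((l.set (i + t * g) vm).set (i + m * g) vt) i g =
            (strideN (l.set (i + t * g) vm) i g).set m vt := by
          have := strideN_set_on (l.set (i + t * g) vm) g vt hg
            (l.set (i + t * g) vm).length i m (by omega) (by simp; exact hm2)
          exact this
        rw [e2, e1]
        rw [strideN_getElem l g hg m i hm2 hms, strideN_getElem l g hg t i hc hts]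
        rw [hvm, hvt, List.getD_eq_getElem l 0 hm2, List.getD_eq_getElem l 0 hc]
      have hperm2 : (strideN l2 i g).Perm (strideN l i g) := by
        rw [hstr2]; exact List.set_set_perm hts hms
      have hoff2 : ∀ q, (∀ w, q ≠ i + w * g) → l2[q]? = l[q]? := by
        intro q hq
        rw [hl2, List.getElem?_set, if_neg (hq m).symm, List.getElem?_set,
          if_neg (hq t).symm]
      obtain ⟨ih1, ih2, ih3, ih4⟩ := ih l2 (t + 1) (by rw [hlen2, ← hn]) (by omega) hinv2
      refine ⟨by rw [ih1, hlen2], ?_, ih3.trans hperm2, ih4⟩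
      intro q hq
      rw [ih2 q hq]
      exact hoff2 q hq
    · rw [pyRange_pos_nil _ _ _ (by exact_mod_cast hg)
        (by rw [hn]; exact_mod_cast (by omega : l.length ≤ i + t * g))]
      exact ⟨rfl, fun q _ => rfl, List.Perm.refl _,
        passB_stop i g hg l t (by omega) hinv⟩

lemma pass_unique (i g : Nat) (hg : 0 < g) (l r1 r2 : List Int)
    (hlen1 : r1.length = l.length)
    (hoff1 : ∀ q, (∀ w, q ≠ i + w * g) → r1[q]? = l[q]?)
    (hperm1 : (strideN r1 i g).Perm (strideN l i g))
    (hsort1 : (strideN r1 i g).Pairwise (· ≤ ·))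
    (hlen2 : r2.length = l.length)
    (hoff2 : ∀ q, (∀ w, q ≠ i + w * g) → r2[q]? = l[q]?)
    (hperm2 : (strideN r2 i g).Perm (strideN l i g))
    (hsort2 : (strideN r2 i g).Pairwise (· ≤ ·)) : r1 = r2 := by
  have hstr : strideN r1 i g = strideN r2 i g :=
    List.Perm.eq_of_pairwise (fun a b _ _ hab hba => le_antisymm hab hba)
      hsort1 hsort2 (hperm1.trans hperm2.symm)
  apply List.ext_getElem?
  intro q
  by_cases hq : ∀ w, q ≠ i + w * g
  · rw [hoff1 q hq, hoff2 q hq]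
  · push_neg at hq
    obtain ⟨w, rfl⟩ := hq
    by_cases hql : i + w * g < l.length
    · have e1 := strideN_getElem? r1 g hg w i (by omega)
      have e2 := strideN_getElem? r2 g hg w i (by omega)
      rw [hstr, e2] at e1
      rw [List.getElem?_eq_getElem (by omega), List.getElem?_eq_getElem (by omega)]
      exact e1.symm
    · rw [List.getElem?_eq_none (by omega), List.getElem?_eq_none (by omega)]

lemma take_one_pairwise (l : List Int) : (l.take 1).Pairwise (· ≤ ·) := by
  cases l <;> simp

lemma passA_good (i g : Nat) (hg : 0 < g) (l : List Int) :
    (aJ l (↑i) (↑g) ((↑i) + (↑g)) (↑l.length)).length = l.length ∧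
    (∀ q, (∀ w, q ≠ i + w * g) → (aJ l (↑i) (↑g) ((↑i) + (↑g)) (↑l.length))[q]? = l[q]?) ∧
    (strideN (aJ l (↑i) (↑g) ((↑i) + (↑g)) (↑l.length)) i g).Perm (strideN l i g) ∧
    (strideN (aJ l (↑i) (↑g) ((↑i) + (↑g)) (↑l.length)) i g).Pairwise (· ≤ ·) := by
  have h1 : ((↑i : Int) + ↑g) = ↑(i + 1 * g) := by push_cast; ring
  rw [h1]
  exact passA_aux i g hg l.length l 1 (by omega) (take_one_pairwise _)

lemma passB_good (i g : Nat) (hg : 0 < g) (nn : Int) (l : List Int) (hn : nn = ↑l.length) :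
    ((PySem.List.pyRange (↑i) nn (↑g)).foldl
        (fun a j =>
          let m := (PySem.List.pyRange (j + ↑g) nn (↑g)).foldl
            (fun m k => if PySem.List.pyGetD a k 0 < PySem.List.pyGetD a m 0 then k else m) j
          PySem.List.pySetD (PySem.List.pySetD a j (PySem.List.pyGetD a m 0)) m
            (PySem.List.pyGetD a j 0)) l).length = l.length ∧
    (∀ q, (∀ w, q ≠ i + w * g) →
      ((PySem.List.pyRange (↑i) nn (↑g)).foldl
        (fun a j =>
          let m := (PySem.List.pyRange (j + ↑g) nn (↑g)).foldl
            (fun m k => if PySem.List.pyGetD a k 0 < PySem.List.pyGetD a m 0 then k else m) j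
          PySem.List.pySetD (PySem.List.pySetD a j (PySem.List.pyGetD a m 0)) m
            (PySem.List.pyGetD a j 0)) l)[q]? = l[q]?) ∧
    (strideN ((PySem.List.pyRange (↑i) nn (↑g)).foldl
        (fun a j =>
          let m := (PySem.List.pyRange (j + ↑g) nn (↑g)).foldl
            (fun m k => if PySem.List.pyGetD a k 0 < PySem.List.pyGetD a m 0 then k else m) j
          PySem.List.pySetD (PySem.List.pySetD a j (PySem.List.pyGetD a m 0)) m
            (PySem.List.pyGetD a j 0)) l) i g).Perm (strideN l i g) ∧
    (strideN ((PySem.List.pyRange (↑i) nn (↑g)).foldl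
        (fun a j =>
          let m := (PySem.List.pyRange (j + ↑g) nn (↑g)).foldl
            (fun m k => if PySem.List.pyGetD a k 0 < PySem.List.pyGetD a m 0 then k else m) j
          PySem.List.pySetD (PySem.List.pySetD a j (PySem.List.pyGetD a m 0)) m
            (PySem.List.pyGetD a j 0)) l) i g).Pairwise (· ≤ ·) := by
  have h1 : (↑i : Int) = ↑(i + 0 * g) := by push_cast; ring
  rw [h1]
  exact passB_aux i g hg nn l.length l 0 hn (by omega) (by omega)

lemma outer (g L : Nat) (hg : 0 < g) :
    ∀ (md : Nat) (l : List Int) (i : Nat), i + md = g → l.length = L →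
      aI l (↑i) (↑g) (↑L) =
        (PySem.List.pyRange (↑i) (↑g) 1).foldl (fun a start =>
          (PySem.List.pyRange start (↑L) (↑g)).foldl (fun a j =>
            let m := (PySem.List.pyRange (j + ↑g) (↑L) (↑g)).foldl
              (fun m k => if PySem.List.pyGetD a k 0 < PySem.List.pyGetD a m 0 then k else m) j
            PySem.List.pySetD (PySem.List.pySetD a j (PySem.List.pyGetD a m 0)) m
              (PySem.List.pyGetD a j 0)) a) l := by
  intro md
  induction md with
  | zero =>
    intro l i hig hL
    rw [aI, dif_neg (by exact_mod_cast (by omega : ¬ i < g))]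
    rw [pyRange_pos_nil _ _ _ (by omega) (by exact_mod_cast (by omega : g ≤ i))]
    simp
  | succ md ihm =>
    intro l i hig hL
    have hig' : i < g := by omega
    rw [aI, dif_pos (by exact_mod_cast hig')]
    rw [pyRange_pos_cons _ _ _ (by omega) (by exact_mod_cast hig')]
    simp only [List.foldl_cons]
    obtain ⟨a1, a2, a3, a4⟩ := passA_good i g hg l
    obtain ⟨b1, b2, b3, b4⟩ := passB_good i g hg (↑L) l (by rw [hL])
    have heq : aJ l (↑i) (↑g) ((↑i) + (↑g)) (↑l.length) =
        (PySem.List.pyRange (↑i) (↑L) (↑g)).foldl (fun a j =>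
            let m := (PySem.List.pyRange (j + ↑g) (↑L) (↑g)).foldl
              (fun m k => if PySem.List.pyGetD a k 0 < PySem.List.pyGetD a m 0 then k else m) j
            PySem.List.pySetD (PySem.List.pySetD a j (PySem.List.pyGetD a m 0)) m
              (PySem.List.pyGetD a j 0)) l :=
      pass_unique i g hg l _ _ a1 a2 a3 a4 b1 b2 b3 b4
    have heq' : aJ l (↑i) (↑g) ((↑i) + (↑g)) (↑L) =
        (PySem.List.pyRange (↑i) (↑L) (↑g)).foldl (fun a j =>
            let m := (PySem.List.pyRange (j + ↑g) (↑L) (↑g)).foldl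
              (fun m k => if PySem.List.pyGetD a k 0 < PySem.List.pyGetD a m 0 then k else m) j
            PySem.List.pySetD (PySem.List.pySetD a j (PySem.List.pyGetD a m 0)) m
              (PySem.List.pyGetD a j 0)) l := by
      conv_lhs => rw [show (↑L : Int) = ↑l.length from by rw [hL]]
      exact heq
    rw [heq']
    rw [show ((↑i : Int) + 1) = ↑(i + 1) from by push_cast; ring]
    exact ihm _ (i + 1) (by omega) (by rw [b1, hL])

theorem AB_eq (arr : List Int) (gap : Int) :
    insertSortShell arr gap = insertSortShell_alt arr gap := by
  unfold insertSortShell insertSortShell_alt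
  by_cases hgap : 0 < gap
  · obtain ⟨g, rfl⟩ : ∃ g : Nat, gap = (↑g : Int) :=
      ⟨gap.toNat, (Int.toNat_of_nonneg (by omega)).symm⟩
    have hg : 0 < g := by exact_mod_cast hgap
    exact outer g arr.length hg g arr 0 (by omega) rfl
  · rw [aI, dif_neg hgap]
    rw [PySem.List.pyRange_one_eq_nil (by omega)]
    simp

-- ===== VERDICT (by name: the statement is the Claim_ definition above) =====
theorem insertSortShell_spec : Claim_equal_insertSortShell := by
  intro arr gap _
  unfold Spec_insertSortShell
  exact AB_eq arr gap
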